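-- pv_equiv track=rewrite | github.com/Gaelic-Algorithmic-Research-Group/Gaelic-Text-Normaliser | resources/gd_analyser_pipeline/seg.py | s_reglue1c
-- ===== SOURCE A (Python) =====
-- def s_reglue1c(string):
--     string2 = []
--     i = 0
--     while i < len(string):
--         string_to_scan = string[i:i+5]
--         if len(string_to_scan) < 5:
--             string2.append(string[i])
--             i = i + 1
--         elif string_to_scan[0] == '^' and string_to_scan[1].isupper() and string_to_scan[2:] == '^.|':
--             string2.append(string_to_scan[0:4])
--             i = i + 5
--         else:
--             string2.append(string[i])
--             i = i + 1
--     return(''.join(string2))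
-- ===== SOURCE B (Python) =====
-- import re
--
-- def s_reglue1c(string):
--     # single regex pass: '^X^.|' -> '^X^.' when X is an uppercase letter
--     return re.sub(r'\^(.)\^\.\|',
--                   lambda m: m.group(0)[:4] if m.group(1).isupper() else m.group(0),
--                   string)
-- ===== Notes on version B (the rewrite author's own statement) =====
-- stated objective: idiomatic
-- what changed: The manual index-based while loop with explicit 5-char window slicing is replaced by a single re.sub over the marker pattern with a callback that truncates the match to its first four characters when the captured character .isupper(), else leaves the match unchanged.
import Mathlib
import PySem

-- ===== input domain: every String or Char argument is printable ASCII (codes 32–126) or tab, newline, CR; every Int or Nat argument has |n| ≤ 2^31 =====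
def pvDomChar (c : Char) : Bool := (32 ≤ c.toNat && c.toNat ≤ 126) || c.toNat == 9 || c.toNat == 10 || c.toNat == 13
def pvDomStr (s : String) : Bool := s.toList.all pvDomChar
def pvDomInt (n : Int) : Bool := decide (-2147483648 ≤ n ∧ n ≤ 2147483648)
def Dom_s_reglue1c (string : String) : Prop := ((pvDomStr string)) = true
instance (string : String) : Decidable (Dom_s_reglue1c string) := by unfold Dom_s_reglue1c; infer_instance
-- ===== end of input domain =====

-- B replaces A's manual index/window while-loop by one regex-substitution pass
-- ('^X^.|' -> '^X^.' for uppercase X); proved equal on all Dom inputs (no Pre_: A is total).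

-- ===== PORT A =====
-- A's while loop over index i, transcribed as recursion on the remaining character list:
-- the 5-char window string[i:i+5] is the first five elements of the remainder.
def sReglueAGo : List Char → List Char
  | c0 :: c1 :: c2 :: c3 :: c4 :: rest =>
      if c0 = '^' ∧ PySem.Chars.isupper c1 = true ∧ c2 = '^' ∧ c3 = '.' ∧ c4 = '|' then
        [c0, c1, c2, c3] ++ sReglueAGo rest                 -- append string_to_scan[0:4], i += 5
      else
        c0 :: sReglueAGo (c1 :: c2 :: c3 :: c4 :: rest)     -- append string[i], i += 1
  | c :: rest => c :: sReglueAGo rest                        -- len(string_to_scan) < 5: append string[i], i += 1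
  | [] => []

def s_reglue1c (string : String) : String :=
  String.ofList (sReglueAGo string.toList)

-- ===== PORT B =====
-- re.sub with a callback: hand-port of the regex engine's left-to-right non-overlapping
-- scan for the fixed pattern '\^(.)\^\.\|' (exact here; the group '.' never matches '\n',
-- hence the inner guard); the callback keeps match[:4] if the group .isupper(), else the match.
def sReglueBGo : List Char → List Char
  | '^' :: c :: '^' :: '.' :: '|' :: rest =>
      if c ≠ '\n' then
        (if PySem.Chars.isupper c then ['^', c, '^', '.'] else ['^', c, '^', '.', '|'])
          ++ sReglueBGo rest
      else '^' :: sReglueBGo (c :: '^' :: '.' :: '|' :: rest)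
  | c :: rest => c :: sReglueBGo rest
  | [] => []

def s_reglue1c_alt (string : String) : String :=
  String.ofList (sReglueBGo string.toList)

-- ===== PRECONDITION & SPEC =====
def Spec_s_reglue1c (string : String) (out : String) : Prop := out = s_reglue1c_alt string
instance (string : String) (out : String) : Decidable (Spec_s_reglue1c string out) := by unfold Spec_s_reglue1c; infer_instance

-- ===== CLAIM (what is proved, stated in full; the proofs are below) =====
def Claim_equal_s_reglue1c : Prop := ∀ (string : String), Dom_s_reglue1c string → Spec_s_reglue1c string (s_reglue1c string)

-- ===== LEMMAS AND PROOFS =====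

-- A copies one char and moves on whenever the head cannot start a match.
theorem sReglueAGo_not_caret {c : Char} (h : c ≠ '^') (l : List Char) :
    sReglueAGo (c :: l) = c :: sReglueAGo l := by
  rw [sReglueAGo.eq_def]
  split <;> simp_all

-- A also moves on by one when '^' is followed by a non-uppercase character.
theorem sReglueAGo_caret_not_upper {c : Char} (h : PySem.Chars.isupper c = false) (l : List Char) :
    sReglueAGo ('^' :: c :: l) = '^' :: sReglueAGo (c :: l) := by
  rw [sReglueAGo.eq_def]
  split
  · rename_i heq
    obtain ⟨rfl, rfl, rfl⟩ := heq
    simp [h]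
  · rename_i heq
    injection heq with h1 h2
    subst h1; subst h2; rfl
  · rename_i heq
    exact absurd heq (by simp)

-- any char directly followed by '^' is copied (a match would need that '^' to be uppercase)
theorem sReglueAGo_before_caret (c : Char) (l : List Char) :
    sReglueAGo (c :: '^' :: l) = c :: sReglueAGo ('^' :: l) := by
  by_cases hc : c = '^'
  · subst hc; exact sReglueAGo_caret_not_upper (by decide) _
  · exact sReglueAGo_not_caret hc _

-- B copies the head when the 5-char window does not have the '^?^.|' shape.
theorem sReglueBGo_no_shape {c0 c2 c3 c4 : Char} (c1 : Char) (rest : List Char)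
    (h : ¬(c0 = '^' ∧ c2 = '^' ∧ c3 = '.' ∧ c4 = '|')) :
    sReglueBGo (c0 :: c1 :: c2 :: c3 :: c4 :: rest)
      = c0 :: sReglueBGo (c1 :: c2 :: c3 :: c4 :: rest) := by
  rw [sReglueBGo.eq_def]
  split <;> simp_all

theorem sReglueGo_eq : ∀ (l : List Char), sReglueAGo l = sReglueBGo l
  | [] => rfl
  | [c] => by simp [sReglueAGo, sReglueBGo]
  | [c, c1] => by simp [sReglueAGo, sReglueBGo]
  | [c, c1, c2] => by simp [sReglueAGo, sReglueBGo]
  | [c, c1, c2, c3] => by simp [sReglueAGo, sReglueBGo]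
  | c0 :: c1 :: c2 :: c3 :: c4 :: rest => by
      by_cases hpat : c0 = '^' ∧ c2 = '^' ∧ c3 = '.' ∧ c4 = '|'
      · obtain ⟨h0, h2, h3, h4⟩ := hpat
        subst h0; subst h2; subst h3; subst h4
        by_cases hu : PySem.Chars.isupper c1 = true
        · -- uppercase: A skips 5 emitting 4 chars; B's regex matches and drops '|'
          have hn : c1 ≠ '\n' := by
            intro h; rw [h] at hu; exact absurd hu (by decide)
          rw [sReglueAGo, sReglueBGo]
          simp [hu, hn, sReglueGo_eq rest]
        · -- shape '^c^.|' with non-upper c: A walks through all five chars one at a time;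
          -- no alternate match can start inside the window, so both end up at rest
          have hu' : PySem.Chars.isupper c1 = false := by simpa using hu
          have hA : sReglueAGo ('^' :: c1 :: '^' :: '.' :: '|' :: rest)
              = '^' :: c1 :: '^' :: '.' :: '|' :: sReglueAGo rest := by
            rw [sReglueAGo_caret_not_upper hu', sReglueAGo_before_caret,
                sReglueAGo_caret_not_upper (c := '.') (by decide),
                sReglueAGo_not_caret (by decide), sReglueAGo_not_caret (by decide)]
          by_cases hn : c1 = '\n'
          · -- B's regex group '.' does not match '\n': B also walks char by char
            subst hn
            rw [hA, sReglueBGo]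
            simp only [ne_eq, not_true_eq_false, if_false, ← sReglueGo_eq ('\n' :: '^' :: '.' :: '|' :: rest)]
            rw [sReglueAGo_not_caret (by decide),
                sReglueAGo_caret_not_upper (c := '.') (by decide),
                sReglueAGo_not_caret (by decide), sReglueAGo_not_caret (by decide)]
          · -- regex matches, callback returns the whole match unchanged (5 chars consumed)
            rw [hA, sReglueBGo]
            simp [hn, hu', sReglueGo_eq rest]
      · -- no '^?^.|' shape: both copy the head and continue at the next char
        have hA : sReglueAGo (c0 :: c1 :: c2 :: c3 :: c4 :: rest)
            = c0 :: sReglueAGo (c1 :: c2 :: c3 :: c4 :: rest) := by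
          rw [sReglueAGo.eq_def]; split <;> simp_all
        rw [hA, sReglueBGo_no_shape c1 rest hpat, sReglueGo_eq (c1 :: c2 :: c3 :: c4 :: rest)]
  termination_by l => l.length

-- ===== VERDICT (by name: the statement is the Claim_ definition above) =====
theorem s_reglue1c_spec : Claim_equal_s_reglue1c := by
  intro s _
  unfold Spec_s_reglue1c s_reglue1c s_reglue1c_alt
  rw [sReglueGo_eq]
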